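-- pv_equiv track=rewrite | github.com/Mahounan/hurricane_analysis_project_codecademy | hurricane_analysis.py | affected_area_count
-- ===== SOURCE A (Python) =====
-- def affected_area_count(listofareas):
--     count_of_areas={}
--     for areas in listofareas:
--         for area in areas:
--             if area not in count_of_areas.keys():
--                 count_of_areas[area]= areas.count(area)
--                 continue #Once if is satisfied, the remainder of the code is ignored!Executed only when if not satisfied
--             count_of_areas[area] += areas.count(area)
--     return count_of_areas
-- ===== SOURCE B (Python) =====
-- def affected_area_count(listofareas):
--     result = {}
--     for areas in listofareas:
--         freq = {}
--         for area in areas: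
--             freq[area] = freq.get(area, 0) + 1
--         for area, c in freq.items():
--             result[area] = result.get(area, 0) + c * c
--     return result
-- ===== Notes on version B (the rewrite author's own statement) =====
-- stated objective: faster
-- what changed: A rescans each inner list with list.count for every element (quadratic per list); B builds a per-list frequency table in one pass and then adds count*count once per distinct area.
import Mathlib
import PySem

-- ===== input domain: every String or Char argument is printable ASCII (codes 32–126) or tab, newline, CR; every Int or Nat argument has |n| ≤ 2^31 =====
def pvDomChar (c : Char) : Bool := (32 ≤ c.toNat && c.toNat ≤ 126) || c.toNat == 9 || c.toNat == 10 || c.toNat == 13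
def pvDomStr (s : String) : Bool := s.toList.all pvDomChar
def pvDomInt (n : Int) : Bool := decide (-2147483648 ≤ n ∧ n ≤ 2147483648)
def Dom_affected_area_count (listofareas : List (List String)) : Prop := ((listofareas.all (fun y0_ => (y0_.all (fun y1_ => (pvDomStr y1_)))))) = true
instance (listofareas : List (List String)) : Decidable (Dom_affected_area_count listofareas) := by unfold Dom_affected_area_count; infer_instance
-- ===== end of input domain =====

-- B builds a one-pass per-list frequency table and adds count*count per distinct area,
-- replacing A's per-element list.count rescans (asymptotically faster per list).
-- ===== PORT A =====
def affected_area_count (listofareas : List (List String)) : List (String × Int) :=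
  (listofareas.foldl
    (fun count_of_areas areas =>
      areas.foldl
        (fun count_of_areas area =>
          if ¬ (count_of_areas.contains area) then
            count_of_areas.insert area ((areas.count area : Int))
          else
            count_of_areas.insert area (count_of_areas.getD area 0 + (areas.count area : Int)))
        count_of_areas)
    PySem.Dict.empty).items

-- ===== PORT B =====
def affected_area_count_alt (listofareas : List (List String)) : List (String × Int) :=
  (listofareas.foldl
    (fun result areas =>
      let freq : PySem.Dict String Int :=
        areas.foldl (fun freq area => freq.insert area (freq.getD area 0 + 1)) PySem.Dict.empty
      freq.items.foldl
        (fun result p => result.insert p.1 (result.getD p.1 0 + p.2 * p.2))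
        result)
    PySem.Dict.empty).items

-- ===== PRECONDITION & SPEC =====
def Spec_affected_area_count (listofareas : List (List String)) (out : List (String × Int)) : Prop := out = affected_area_count_alt listofareas
instance (listofareas : List (List String)) (out : List (String × Int)) : Decidable (Spec_affected_area_count listofareas out) := by unfold Spec_affected_area_count; infer_instance

-- ===== CLAIM (what is proved, stated in full; the proofs are below) =====
def Claim_equal_affected_area_count : Prop := ∀ (listofareas : List (List String)), Dom_affected_area_count listofareas → Spec_affected_area_count listofareas (affected_area_count listofareas)

-- ===== LEMMAS AND PROOFS =====

-- A's per-element step (set on first sight, += afterwards) is one uniform insert.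
lemma pv_astep_eq (L : List String) :
    (fun (d : PySem.Dict String Int) (a : String) =>
        if ¬ (d.contains a) then d.insert a ((L.count a : Int))
        else d.insert a (d.getD a 0 + (L.count a : Int)))
    = (fun d a => d.insert a (d.getD a 0 + (L.count a : Int))) := by
  funext d a
  by_cases h : d.contains a
  · simp [h]
  · simp only [Bool.not_eq_true] at h
    simp [h, PySem.Dict.getD_of_not_contains d (0 : Int) h]

-- value of a fold of inserts 'd[a] = d.get(a,0) + w a' at any key
lemma pv_gfold (w : String → Int) (M : List String) :
    ∀ (d : PySem.Dict String Int) (k : String),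
      (M.foldl (fun d a => d.insert a (d.getD a 0 + w a)) d).getD k 0
        = d.getD k 0 + (M.count k : Int) * w k := by
  induction M with
  | nil => intro d k; simp
  | cons a t ih =>
    intro d k
    simp only [List.foldl_cons, ih, PySem.Dict.getD_insert, List.count_cons]
    by_cases h : k = a
    · subst h
      simp only [beq_self_eq_true, if_true]
      push_cast
      ring_nf
    · simp [h, Ne.symm h]

-- updating with the deduplicated list updates the same
lemma pv_update_ofList (s : List String) (L : List String) :
    PySem.Set.update s (PySem.Set.ofList L) = PySem.Set.update s L := by
  rw [PySem.Set.update_eq_append_filter, PySem.Set.update_eq_append_filter,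
      PySem.Set.ofList_ofList]

-- per inner list: A's element-by-element fold equals B's fold over distinct areas
lemma pv_inner_eq (L : List String) (d : PySem.Dict String Int) (hnd : d.keys.Nodup) :
    L.foldl (fun d a => d.insert a (d.getD a 0 + (L.count a : Int))) d
      = (PySem.Set.ofList L).foldl
          (fun d a => d.insert a (d.getD a 0 + (L.count a : Int) * (L.count a : Int))) d := by
  have hndA := PySem.Dict.nodup_keys_foldl_insert L
    (fun d a => d.getD a 0 + (L.count a : Int)) d hnd
  have hndB := PySem.Dict.nodup_keys_foldl_insert (PySem.Set.ofList L)
    (fun d a => d.getD a 0 + (L.count a : Int) * (L.count a : Int)) d hnd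
  apply PySem.Dict.ext
  rw [PySem.Dict.items_eq_map_keys _ hndA (0 : Int),
      PySem.Dict.items_eq_map_keys _ hndB (0 : Int),
      PySem.Dict.keys_foldl_insert, PySem.Dict.keys_foldl_insert, pv_update_ofList]
  apply List.map_congr_left
  intro k hk
  rw [pv_gfold, pv_gfold]
  by_cases h : k ∈ L
  · rw [List.count_eq_one_of_mem (PySem.Set.nodup_ofList L) ((PySem.Set.mem_ofList L k).mpr h)]
    push_cast; ring_nf
  · rw [List.count_eq_zero_of_not_mem h,
        List.count_eq_zero_of_not_mem (fun hc => h ((PySem.Set.mem_ofList L k).mp hc))]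
    norm_num

-- the two outer folds agree from any dict with distinct keys
lemma pv_outer_eq (ls : List (List String)) :
    ∀ (d : PySem.Dict String Int), d.keys.Nodup →
      ls.foldl
        (fun count_of_areas areas =>
          areas.foldl
            (fun count_of_areas area =>
              if ¬ (count_of_areas.contains area) then
                count_of_areas.insert area ((areas.count area : Int))
              else
                count_of_areas.insert area (count_of_areas.getD area 0 + (areas.count area : Int)))
            count_of_areas)
        d
      = ls.foldl
          (fun result areas =>
            let freq : PySem.Dict String Int :=
              areas.foldl (fun freq area => freq.insert area (freq.getD area 0 + 1)) PySem.Dict.empty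
            freq.items.foldl
              (fun result p => result.insert p.1 (result.getD p.1 0 + p.2 * p.2))
              result)
          d := by
  induction ls with
  | nil => intro d _; rfl
  | cons L t ih =>
    intro d hnd
    simp only [List.foldl_cons]
    rw [pv_astep_eq L, pv_inner_eq L d hnd,
        PySem.Dict.foldl_insert_getD_add_one_eq_counter, PySem.Dict.items_counter,
        List.foldl_map]
    exact ih _ (PySem.Dict.nodup_keys_foldl_insert _ _ _ hnd)

-- ===== VERDICT (by name: the statement is the Claim_ definition above) =====
theorem affected_area_count_spec : Claim_equal_affected_area_count := by
  intro listofareas _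
  unfold Spec_affected_area_count affected_area_count affected_area_count_alt
  rw [pv_outer_eq listofareas PySem.Dict.empty (by simp [PySem.Dict.keys_empty])]
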